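-- pv_equiv track=rewrite | github.com/Duanyll/duanyll_nodepack | src/duanyll_nodepack/data/json.py | _find_last_json_object
-- ===== SOURCE A (Python) =====
-- def _find_last_json_object(text: str) -> str:
--     """
--     从字符串末尾开始查找第一个完整匹配的 JSON 对象或数组。
--     """
--     text = text.strip()
--
--     # 查找最后一个 '}' 或 ']'
--     last_brace = text.rfind("}")
--     last_bracket = text.rfind("]")
--
--     if last_brace == -1 and last_bracket == -1:
--         return ""
--
--     last_end_char_index = max(last_brace, last_bracket)
--     end_char = text[last_end_char_index]
--     start_char = "{" if end_char == "}" else "["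
--
--     level = 0
--     # 从后向前遍历，寻找匹配的起始符号
--     for i in range(last_end_char_index, -1, -1):
--         char = text[i]
--         if char == end_char:
--             level += 1
--         elif char == start_char:
--             level -= 1
--             if level == 0:
--                 # 找到了匹配的起始位置
--                 return text[i : last_end_char_index + 1]
--
--     return ""  # 没有找到完整的 JSON 对象
-- ===== SOURCE B (Python) =====
-- def _find_last_json_object(text: str) -> str:
--     """
--     Forward single pass: precompute bracket totals of the region ending at the
--     last closer, then record the last opener whose prefix balance matches the
--     region's total imbalance (that opener matches the final closer).
--     """
--     text = text.strip()
--
--     last_brace = text.rfind("}")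
--     last_bracket = text.rfind("]")
--
--     if last_brace == -1 and last_bracket == -1:
--         return ""
--
--     end = max(last_brace, last_bracket)
--     end_char = text[end]
--     start_char = "{" if end_char == "}" else "["
--
--     region = text[:end + 1]
--     delta = region.count(start_char) - region.count(end_char)
--
--     balance = 0
--     best = -1
--     for i, ch in enumerate(region):
--         if ch == end_char:
--             balance -= 1
--         elif ch == start_char:
--             if balance == delta:
--                 best = i
--             balance += 1
--
--     if best == -1:
--         return ""
--     return text[best:end + 1]
-- ===== Notes on version B (the rewrite author's own statement) =====
-- stated objective: alternative
-- what changed: Replaces A's backward depth-counter scan with early return by a single forward pass that precomputes the region's bracket totals and records the last opener whose prefix balance equals the region's total imbalance (that opener matches the final closer).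
import Mathlib
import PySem

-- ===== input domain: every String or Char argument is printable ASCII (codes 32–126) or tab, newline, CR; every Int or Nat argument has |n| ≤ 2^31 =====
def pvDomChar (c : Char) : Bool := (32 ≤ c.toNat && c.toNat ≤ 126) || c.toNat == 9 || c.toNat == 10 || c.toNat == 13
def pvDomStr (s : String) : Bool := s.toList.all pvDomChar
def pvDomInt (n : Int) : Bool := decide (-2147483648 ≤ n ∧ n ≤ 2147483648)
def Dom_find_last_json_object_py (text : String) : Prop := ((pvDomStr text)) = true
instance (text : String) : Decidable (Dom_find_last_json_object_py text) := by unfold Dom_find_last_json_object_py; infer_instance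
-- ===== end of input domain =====

-- B replaces A's backward depth-counter scan (early return) with a single forward pass that
-- precomputes the region's bracket totals and records the last opener whose prefix balance
-- matches the total imbalance; objective: alternative (same O(n) cost).

-- ===== PORT A =====
-- the loop 'for i in range(last_end_char_index, -1, -1)' with its early return;
-- on every reachable call 0 ≤ i ≤ e < len(text), so the getD default ' ' is never read
def goA (t : String) (endc startc : Char) (e : Nat) (i : Nat) (level : Int) : String :=
  let c := t.toList.getD i ' '
  if c = endc then
    match i with
    | 0 => ""
    | Nat.succ j => goA t endc startc e j (level + 1)
  else if c = startc then
    if level - 1 = 0 then PySem.Str.slice t (some (i : Int)) (some ((e : Int) + 1))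
    else match i with
      | 0 => ""
      | Nat.succ j => goA t endc startc e j (level - 1)
  else match i with
    | 0 => ""
    | Nat.succ j => goA t endc startc e j level

def find_last_json_object_py (text : String) : String :=
  let t := PySem.Str.strip text
  let last_brace := PySem.Str.rfind t "}"
  let last_bracket := PySem.Str.rfind t "]"
  if last_brace = -1 ∧ last_bracket = -1 then ""
  else
    let e := max last_brace last_bracket
    match PySem.Str.pyGet? t e with
    | none => ""   -- unreachable: e is a valid index here (rfind found a character)
    | some endc =>
      let startc := if endc = '}' then '{' else '['
      -- range(e, -1, -1): e ≥ 0 here, counted down as a Nat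
      goA t endc startc e.toNat e.toNat 0

-- ===== PORT B =====
-- the loop body of Source B's forward pass: state (balance, best)
def stepB (endc startc : Char) (delta : Int) (st : Int × Int) (p : Int × Char) : Int × Int :=
  if p.2 = endc then (st.1 - 1, st.2)
  else if p.2 = startc then (st.1 + 1, if st.1 = delta then p.1 else st.2)
  else st

def goB (t : String) (endc startc : Char) (e : Int) : String :=
  let region := PySem.Str.slice t none (some (e + 1))
  let delta : Int := (PySem.Str.count region (String.ofList [startc]) : Int)
                     - (PySem.Str.count region (String.ofList [endc]) : Int)
  let res := (PySem.List.enumerate region.toList 0).foldl (stepB endc startc delta) (0, -1)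
  if res.2 = -1 then "" else PySem.Str.slice t (some res.2) (some (e + 1))

def find_last_json_object_py_alt (text : String) : String :=
  let t := PySem.Str.strip text
  let last_brace := PySem.Str.rfind t "}"
  let last_bracket := PySem.Str.rfind t "]"
  if last_brace = -1 ∧ last_bracket = -1 then ""
  else
    let e := max last_brace last_bracket
    match PySem.Str.pyGet? t e with
    | none => ""   -- unreachable: e is a valid index here
    | some endc =>
      let startc := if endc = '}' then '{' else '['
      goB t endc startc e

-- ===== PRECONDITION & SPEC =====
def Spec_find_last_json_object_py (text : String) (out : String) : Prop := out = find_last_json_object_py_alt text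
instance (text : String) (out : String) : Decidable (Spec_find_last_json_object_py text out) := by unfold Spec_find_last_json_object_py; infer_instance

-- ===== CLAIM (what is proved, stated in full; the proofs are below) =====
def Claim_equal_find_last_json_object_py : Prop := ∀ (text : String), Dom_find_last_json_object_py text → Spec_find_last_json_object_py text (find_last_json_object_py text)

-- ===== LEMMAS AND PROOFS =====

-- weight of a character: +1 for the closer, -1 for the opener (closer checked first), 0 otherwise
def wgt (endc startc c : Char) : Int := if c = endc then 1 else if c = startc then -1 else 0

def sumw (endc startc : Char) (l : List Char) : Int := (l.map (wgt endc startc)).sum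

-- the greatest j ≤ i with q j
def findQ (q : Nat → Bool) : Nat → Option Nat
  | 0 => if q 0 then some 0 else none
  | i+1 => if q (i+1) then some (i+1) else findQ q i

-- the condition under which A's backward loop returns at index j
def qualA (region : List Char) (endc startc : Char) (j : Nat) : Bool :=
  (region.getD j ' ' != endc) && (region.getD j ' ' == startc)
    && (sumw endc startc (region.drop j) == 0)

-- the condition under which B's forward loop records index j
def qualB (region : List Char) (endc startc : Char) (delta : Int) (j : Nat) : Bool :=
  (region.getD j ' ' != endc) && (region.getD j ' ' == startc)
    && (-(sumw endc startc (region.take j)) == delta)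

def enc : Option Nat → Int
  | none => -1
  | some j => (j : Int)

def bst (q : Nat → Bool) : Nat → Int
  | 0 => -1
  | j+1 => enc (findQ q j)

lemma sumw_nil (endc startc : Char) : sumw endc startc [] = 0 := by simp [sumw]

lemma sumw_append (endc startc : Char) (l₁ l₂ : List Char) :
    sumw endc startc (l₁ ++ l₂) = sumw endc startc l₁ + sumw endc startc l₂ := by
  simp [sumw]

lemma rfind_go_ge (s sub : List Char) : ∀ k, -1 ≤ PySem.Chars.rfind.go s sub k := by
  intro k
  induction k with
  | zero => unfold PySem.Chars.rfind.go; split <;> omega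
  | succ j ih => unfold PySem.Chars.rfind.go; split <;> omega

lemma rfind_ge (s sub : String) : -1 ≤ PySem.Str.rfind s sub := by
  simp only [PySem.Str.rfind_eq, PySem.Chars.rfind]
  exact rfind_go_ge _ _ _

lemma count_go_singleton (c : Char) :
    ∀ (fuel : Nat) (l : List Char) (acc : Nat), l.length ≤ fuel →
      PySem.Chars.count.go [c] fuel l acc = acc + l.count c := by
  intro fuel
  induction fuel with
  | zero =>
    intro l acc h
    have : l = [] := by cases l <;> simp_all
    subst this; unfold PySem.Chars.count.go; simp
  | succ f ih =>
    intro l acc h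
    cases l with
    | nil => unfold PySem.Chars.count.go; simp
    | cons x t =>
      unfold PySem.Chars.count.go
      simp only [List.isPrefixOf, List.isPrefixOf_nil_left, Bool.and_true, List.length_cons] at *
      by_cases hx : c = x
      · subst hx
        simp only [beq_self_eq_true, if_true, List.length_cons, List.drop_succ_cons,
          List.drop_zero, List.count_cons_self]
        simp only [List.length_nil, List.drop_zero]
        rw [ih t (acc+1) (by omega)]
        omega
      · have : (c == x) = false := by simp [hx]
        simp only [this, Bool.false_eq_true, if_false]
        rw [ih t acc (by omega), List.count_cons_of_ne (by simpa using Ne.symm hx)]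

lemma count_singleton (s : String) (c : Char) :
    (PySem.Str.count s (String.ofList [c]) : Int) = (s.toList.count c : Int) := by
  have h : PySem.Str.count s (String.ofList [c]) = s.toList.count c := by
    simp only [PySem.Str.count_eq, PySem.Chars.count]
    have : (String.ofList [c]).toList = [c] := by simp
    rw [this]
    simp only [List.isEmpty_cons, if_false, Bool.false_eq_true]
    rw [count_go_singleton c s.toList.length s.toList 0 (le_refl _)]
    omega
  omega

lemma sumw_eq_counts (endc startc : Char) (h : startc ≠ endc) (l : List Char) :
    sumw endc startc l = (l.count endc : Int) - (l.count startc : Int) := by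
  induction l with
  | nil => simp [sumw]
  | cons x t ih =>
    simp only [sumw, List.map_cons, List.sum_cons, List.count_cons] at *
    by_cases h1 : x = endc
    · simp only [wgt, h1, if_true]
      rw [ih]
      have : (endc == startc) = false := by simp [Ne.symm h]
      simp [this]
      omega
    · by_cases h2 : x = startc
      · simp only [wgt, h2, if_neg (by simpa using h), if_true]
        rw [ih]
        have : (startc == endc) = false := by simp [h]
        simp [this]
        omega
      · simp only [wgt, if_neg h1, if_neg h2]
        rw [ih]
        have e1 : (x == endc) = false := by simp [h1]
        have e2 : (x == startc) = false := by simp [h2]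
        simp [e1, e2]

lemma goA_zero (t : String) (endc startc : Char) (e : Nat) (level : Int) :
    goA t endc startc e 0 level =
      (if t.toList.getD 0 ' ' = endc then ""
       else if t.toList.getD 0 ' ' = startc then
         (if level - 1 = 0 then PySem.Str.slice t (some ((0:Nat) : Int)) (some ((e : Int) + 1)) else "")
       else "") := by
  rw [goA]

lemma goA_succ (t : String) (endc startc : Char) (e j : Nat) (level : Int) :
    goA t endc startc e (j+1) level =
      (if t.toList.getD (j+1) ' ' = endc then goA t endc startc e j (level+1)
       else if t.toList.getD (j+1) ' ' = startc then
         (if level - 1 = 0 then PySem.Str.slice t (some (((j+1 : Nat)) : Int)) (some ((e : Int) + 1))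
          else goA t endc startc e j (level-1))
       else goA t endc startc e j level) := by
  rw [goA]

lemma findQ_zero (q : Nat → Bool) : findQ q 0 = if q 0 then some 0 else none := rfl

lemma findQ_succ (q : Nat → Bool) (j : Nat) :
    findQ q (j+1) = if q (j+1) then some (j+1) else findQ q j := rfl

lemma sumw_cons (endc startc : Char) (a : Char) (l : List Char) :
    sumw endc startc (a :: l) = wgt endc startc a + sumw endc startc l := by
  simp [sumw]

lemma goA_spec (t : String) (endc startc : Char) (e : Nat) (hlen : e < t.toList.length) :
    ∀ i, i ≤ e →
      goA t endc startc e i (sumw endc startc ((t.toList.take (e+1)).drop (i+1))) =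
        (match findQ (qualA (t.toList.take (e+1)) endc startc) i with
         | none => ""
         | some j => PySem.Str.slice t (some (j : Int)) (some ((e : Int) + 1))) := by
  set R := t.toList.take (e+1) with hR
  have hrl : R.length = e+1 := by
    rw [hR]; simp only [List.length_take]; omega
  intro i
  induction i with
  | zero =>
    intro _
    have h0 : (0:Nat) < R.length := by omega
    have hc : t.toList.getD 0 ' ' = R.getD 0 ' ' := by
      rw [hR]
      simp [List.getD_eq_getElem?_getD, List.getElem?_take]
    have hget : R.getD 0 ' ' = R[0] := by
      simp [List.getD_eq_getElem?_getD, List.getElem?_eq_getElem h0]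
    have hcons : R = R[0] :: R.drop (0+1) := by
      simpa using List.drop_eq_getElem_cons h0
    have hsum : sumw endc startc R
        = wgt endc startc (R.getD 0 ' ') + sumw endc startc (R.drop (0+1)) := by
      conv_lhs => rw [hcons]
      rw [sumw_cons, hget]
    rw [goA_zero, hc]
    by_cases h1 : R.getD 0 ' ' = endc
    · rw [if_pos h1]
      have hq : qualA R endc startc 0 = false := by
        simp only [qualA, h1]; simp
      simp [findQ_zero, hq]
    · by_cases h2 : R.getD 0 ' ' = startc
      · rw [if_neg h1, if_pos h2]
        have hw : wgt endc startc (R.getD 0 ' ') = -1 := by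
          simp only [wgt]; rw [if_neg h1, if_pos h2]
        have hne : startc ≠ endc := by rw [h2] at h1; exact h1
        by_cases h3 : sumw endc startc R = 0
        · rw [if_pos (by omega)]
          have hq : qualA R endc startc 0 = true := by
            simp only [qualA, h2, List.drop_zero]; simp [hne, h3]
          simp [findQ_zero, hq]
        · rw [if_neg (by omega)]
          have hq : qualA R endc startc 0 = false := by
            simp only [qualA, h2, List.drop_zero]; simp [hne, h3]
          simp [findQ_zero, hq]
      · rw [if_neg h1, if_neg h2]
        have hq : qualA R endc startc 0 = false := by
          have hb : (R.getD 0 ' ' == startc) = false := beq_eq_false_iff_ne.mpr h2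
          simp only [qualA, hb, Bool.and_false, Bool.false_and]
        simp [findQ_zero, hq]
  | succ j ih =>
    intro hij
    have h0 : j+1 < R.length := by omega
    have hc : t.toList.getD (j+1) ' ' = R.getD (j+1) ' ' := by
      rw [hR]
      simp only [List.getD_eq_getElem?_getD, List.getElem?_take,
        if_pos (show j+1 < e+1 by omega)]
    have hget : R.getD (j+1) ' ' = R[j+1] := by
      simp [List.getD_eq_getElem?_getD, List.getElem?_eq_getElem h0]
    have hcons : R.drop (j+1) = R[j+1] :: R.drop (j+1+1) := List.drop_eq_getElem_cons h0
    have hsum : sumw endc startc (R.drop (j+1))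
        = wgt endc startc (R.getD (j+1) ' ') + sumw endc startc (R.drop (j+1+1)) := by
      conv_lhs => rw [hcons]
      rw [sumw_cons, hget]
    rw [goA_succ, hc]
    by_cases h1 : R.getD (j+1) ' ' = endc
    · rw [if_pos h1]
      have hw : wgt endc startc (R.getD (j+1) ' ') = 1 := by
        simp only [wgt]; rw [if_pos h1]
      have harg : sumw endc startc (R.drop (j+1+1)) + 1
          = sumw endc startc (R.drop (j+1)) := by omega
      have hq : qualA R endc startc (j+1) = false := by
        simp only [qualA, h1]; simp
      rw [harg, ih (by omega), findQ_succ]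
      simp [hq]
    · by_cases h2 : R.getD (j+1) ' ' = startc
      · rw [if_neg h1, if_pos h2]
        have hw : wgt endc startc (R.getD (j+1) ' ') = -1 := by
          simp only [wgt]; rw [if_neg h1, if_pos h2]
        have hne : startc ≠ endc := by rw [h2] at h1; exact h1
        by_cases h3 : sumw endc startc (R.drop (j+1)) = 0
        · rw [if_pos (by omega)]
          have hq : qualA R endc startc (j+1) = true := by
            simp only [qualA, h2]; simp [hne, h3]
          rw [findQ_succ]
          simp [hq]
        · rw [if_neg (by omega)]
          have harg : sumw endc startc (R.drop (j+1+1)) - 1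
              = sumw endc startc (R.drop (j+1)) := by omega
          have hq : qualA R endc startc (j+1) = false := by
            simp only [qualA, h2]; simp [hne, h3]
          rw [harg, ih (by omega), findQ_succ]
          simp [hq]
      · rw [if_neg h1, if_neg h2]
        have hw : wgt endc startc (R.getD (j+1) ' ') = 0 := by
          simp only [wgt]; rw [if_neg h1, if_neg h2]
        have harg : sumw endc startc (R.drop (j+1+1))
            = sumw endc startc (R.drop (j+1)) := by omega
        have hq : qualA R endc startc (j+1) = false := by
          have hb : (R.getD (j+1) ' ' == startc) = false := beq_eq_false_iff_ne.mpr h2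
          simp only [qualA, hb, Bool.and_false, Bool.false_and]
        rw [harg, ih (by omega), findQ_succ]
        simp [hq]

lemma enc_findQ (q : Nat → Bool) (i : Nat) :
    enc (findQ q i) = if q i then (i : Int) else bst q i := by
  cases i <;> simp only [findQ, bst] <;> split <;> simp [enc]

lemma stepB_step (region : List Char) (endc startc : Char) (delta : Int) (i : Nat)
    (h0 : i < region.length) :
    stepB endc startc delta
        (-(sumw endc startc (region.take i)), bst (qualB region endc startc delta) i)
        ((i : Int), region[i])
      = (-(sumw endc startc (region.take (i+1))), bst (qualB region endc startc delta) (i+1)) := by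
  have hget : region.getD i ' ' = region[i] := by
    simp [List.getD_eq_getElem?_getD, List.getElem?_eq_getElem h0]
  have htake : region.take (i+1) = region.take i ++ [region[i]] := by
    rw [List.take_succ, List.getElem?_eq_getElem h0]
    rfl
  have hsum2 : sumw endc startc (region.take (i+1))
      = sumw endc startc (region.take i) + wgt endc startc region[i] := by
    rw [htake, sumw_append]
    simp [sumw]
  have hbst : bst (qualB region endc startc delta) (i+1)
      = (if qualB region endc startc delta i then (i : Int)
         else bst (qualB region endc startc delta) i) := by
    show enc (findQ (qualB region endc startc delta) i) = _
    exact enc_findQ _ _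
  by_cases h1 : region[i] = endc
  · have hw : wgt endc startc region[i] = 1 := by
      simp only [wgt]; rw [if_pos h1]
    have hQ : qualB region endc startc delta i = false := by
      simp only [qualB, hget, h1, bne_self_eq_false, Bool.false_and]
    have hc1 : -(sumw endc startc (region.take i)) - 1
        = -(sumw endc startc (region.take (i+1))) := by omega
    simp only [stepB]
    rw [if_pos h1, hbst, hQ]
    simp only [Bool.false_eq_true, if_false, hc1]
  · by_cases h2 : region[i] = startc
    · have hw : wgt endc startc region[i] = -1 := by
        simp only [wgt]; rw [if_neg h1, if_pos h2]
      have hc1 : -(sumw endc startc (region.take i)) + 1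
          = -(sumw endc startc (region.take (i+1))) := by omega
      simp only [stepB]
      rw [if_neg h1, if_pos h2, hbst]
      by_cases h3 : -(sumw endc startc (region.take i)) = delta
      · have hQ : qualB region endc startc delta i = true := by
          have hb1 : (region.getD i ' ' != endc) = true := by rw [hget]; simp [h1]
          have hb2 : (region.getD i ' ' == startc) = true := by rw [hget]; simp [h2]
          simp only [qualB, hb1, hb2, Bool.true_and, Bool.and_true]
          simp [h3]
        rw [hQ, if_pos h3]
        simp only [if_true, hc1]
      · have hQ : qualB region endc startc delta i = false := by
          simp only [qualB]
          have : (-(sumw endc startc (region.take i)) == delta) = false := by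
            simp [h3]
          simp [this]
        rw [hQ, if_neg h3]
        simp only [Bool.false_eq_true, if_false, hc1]
    · have hw : wgt endc startc region[i] = 0 := by
        simp only [wgt]; rw [if_neg h1, if_neg h2]
      have hc1 : -(sumw endc startc (region.take i))
          = -(sumw endc startc (region.take (i+1))) := by omega
      have hQ : qualB region endc startc delta i = false := by
        have hb : (region.getD i ' ' == startc) = false := by rw [hget]; simp [h2]
        simp only [qualB, hb, Bool.and_false, Bool.false_and]
      simp only [stepB]
      rw [if_neg h1, if_neg h2, hbst, hQ]
      simp only [Bool.false_eq_true, if_false, hc1]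

lemma foldB (region : List Char) (endc startc : Char) (delta : Int) :
    ∀ (n i : Nat), region.length = i + n →
      (PySem.List.enumerate (region.drop i) (i : Int)).foldl (stepB endc startc delta)
          (-(sumw endc startc (region.take i)), bst (qualB region endc startc delta) i)
        = (-(sumw endc startc region), bst (qualB region endc startc delta) region.length) := by
  intro n
  induction n with
  | zero =>
    intro i h
    have hi : i = region.length := by omega
    subst hi
    rw [List.drop_of_length_le (le_refl _), List.take_of_length_le (le_refl _)]
    simp [PySem.List.enumerate]
  | succ m ih =>
    intro i h
    have h0 : i < region.length := by omega
    rw [List.drop_eq_getElem_cons h0, PySem.List.enumerate_cons, List.foldl_cons]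
    rw [stepB_step region endc startc delta i h0]
    have hcast : (i : Int) + 1 = ((i+1 : Nat) : Int) := by push_cast; ring
    rw [hcast]
    exact ih (i+1) (by omega)

lemma findQ_congr (q q' : Nat → Bool) :
    ∀ i, (∀ j, j ≤ i → q j = q' j) → findQ q i = findQ q' i := by
  intro i
  induction i with
  | zero => intro h; simp [findQ, h 0 (le_refl 0)]
  | succ j ih =>
    intro h
    simp only [findQ, h (j+1) (le_refl _)]
    rw [ih (fun k hk => h k (Nat.le_succ_of_le hk))]

lemma qual_iff (region : List Char) (endc startc : Char) (delta : Int)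
    (hdelta : delta = (region.count startc : Int) - (region.count endc : Int)) (j : Nat) :
    qualB region endc startc delta j = qualA region endc startc j := by
  by_cases h1 : region.getD j ' ' = endc
  · simp only [qualB, qualA, h1, bne_self_eq_false, Bool.false_and]
  · by_cases h2 : region.getD j ' ' = startc
    · have hne : startc ≠ endc := by rw [h2] at h1; exact h1
      have hsplit : sumw endc startc region
          = sumw endc startc (region.take j) + sumw endc startc (region.drop j) := by
        rw [← sumw_append, List.take_append_drop]
      have hcounts : sumw endc startc region
          = (region.count endc : Int) - (region.count startc : Int) :=
        sumw_eq_counts _ _ hne _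
      simp only [qualB, qualA]
      congr 1
      rw [Bool.eq_iff_iff]
      simp only [beq_iff_eq]
      omega
    · have hb : (region.getD j ' ' == startc) = false := beq_eq_false_iff_ne.mpr h2
      simp only [qualB, qualA, hb, Bool.and_false, Bool.false_and]

lemma core (t : String) (endc startc : Char) (e : Int) (he : 0 ≤ e)
    (hlen : e.toNat < t.toList.length) :
    goA t endc startc e.toNat e.toNat 0 = goB t endc startc e := by
  have heE : ((e.toNat : Nat) : Int) = e := Int.toNat_of_nonneg he
  set R := t.toList.take (e.toNat + 1) with hR
  have hrl : R.length = e.toNat + 1 := by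
    rw [hR]; simp only [List.length_take]; omega
  have hreg : (PySem.Str.slice t none (some (e+1))).toList = R := by
    rw [PySem.Str.toList_slice, PySem.Chars.slice_eq_listSlice, PySem.List.slice_to t.toList (by omega), hR]
    congr 1
    omega
  set Δ : Int := (R.count startc : Int) - (R.count endc : Int) with hΔ
  have hd : (PySem.Str.count (PySem.Str.slice t none (some (e+1))) (String.ofList [startc]) : Int)
      - (PySem.Str.count (PySem.Str.slice t none (some (e+1))) (String.ofList [endc]) : Int) = Δ := by
    rw [count_singleton, count_singleton, hreg]
  have hfold := foldB R endc startc Δ R.length 0 (by omega)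
  simp only [List.drop_zero, List.take_zero, Nat.cast_zero, sumw_nil, neg_zero] at hfold
  have hb0 : bst (qualB R endc startc Δ) 0 = -1 := rfl
  rw [hb0] at hfold
  have hA := goA_spec t endc startc e.toNat (by omega) e.toNat (le_refl _)
  rw [← hR] at hA
  have hzero : sumw endc startc (R.drop (e.toNat+1)) = 0 := by
    rw [List.drop_of_length_le (by omega), sumw_nil]
  rw [hzero] at hA
  simp only [goB]
  rw [hd, hreg, hfold, hrl]
  have hbst : bst (qualB R endc startc Δ) (e.toNat + 1)
      = enc (findQ (qualB R endc startc Δ) e.toNat) := rfl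
  rw [hbst, findQ_congr _ _ _ (fun j _ => qual_iff R endc startc Δ hΔ j)]
  cases hfq : findQ (qualA R endc startc) e.toNat with
  | none =>
    have hA' : goA t endc startc e.toNat e.toNat 0 = "" := by rw [hA, hfq]
    rw [hA', if_pos (show enc none = -1 from rfl)]
  | some j =>
    have hA' : goA t endc startc e.toNat e.toNat 0
        = PySem.Str.slice t (some (j : Int)) (some ((e.toNat : Int) + 1)) := by
      rw [hA, hfq]
    rw [hA', heE, if_neg (show ¬ enc (some j) = -1 by simp only [enc]; omega)]
    simp [enc]

-- ===== VERDICT (by name: the statement is the Claim_ definition above) =====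
set_option maxHeartbeats 1000000 in
theorem find_last_json_object_py_spec : Claim_equal_find_last_json_object_py := by
  intro text _
  unfold Spec_find_last_json_object_py
  simp only [find_last_json_object_py, find_last_json_object_py_alt]
  by_cases hc : (PySem.Str.rfind (PySem.Str.strip text) "}" = -1
      ∧ PySem.Str.rfind (PySem.Str.strip text) "]" = -1)
  · rw [if_pos hc, if_pos hc]
  · rw [if_neg hc, if_neg hc]
    have hge1 := rfind_ge (PySem.Str.strip text) "}"
    have hge2 := rfind_ge (PySem.Str.strip text) "]"
    have he : 0 ≤ max (PySem.Str.rfind (PySem.Str.strip text) "}")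
        (PySem.Str.rfind (PySem.Str.strip text) "]") := by
      rcases not_and_or.mp hc with h | h
      · exact le_max_of_le_left (by omega)
      · exact le_max_of_le_right (by omega)
    cases hg : PySem.Str.pyGet? (PySem.Str.strip text)
        (max (PySem.Str.rfind (PySem.Str.strip text) "}")
             (PySem.Str.rfind (PySem.Str.strip text) "]")) with
    | none => simp only [hg]
    | some endc =>
      simp only [hg]
      have hg' := hg
      rw [← Int.toNat_of_nonneg he, PySem.Str.pyGet?_natCast] at hg'
      obtain ⟨hlt, -⟩ := List.getElem?_eq_some_iff.mp hg'
      exact core _ endc _ _ he hlt
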